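-- pv_equiv track=rewrite | github.com/gEoNNNN/LFA | LAB1/main.py | check_nfa
-- ===== SOURCE A (Python) =====
-- def check_nfa(input_dict):
--     check = True
--     for _, strings in input_dict.items():
--         first_letters = [string[0] for string in strings if string]
--         if len(set(first_letters)) < len(first_letters):
--             check = False
--             break
--     return check
-- ===== SOURCE B (Python) =====
-- def check_nfa(input_dict):
--     for _, strings in input_dict.items():
--         firsts = sorted(s[0] for s in strings if s)
--         if any(x == y for x, y in zip(firsts, firsts[1:])):
--             return False
--     return True
-- ===== Notes on version B (the rewrite author's own statement) =====
-- stated objective: alternative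
-- what changed: Replaces the per-state set-size comparison (len(set(fl)) < len(fl)) with sorting the first letters and scanning adjacent pairs for an equal neighbour, returning False on the first duplicate found.
import Mathlib
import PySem

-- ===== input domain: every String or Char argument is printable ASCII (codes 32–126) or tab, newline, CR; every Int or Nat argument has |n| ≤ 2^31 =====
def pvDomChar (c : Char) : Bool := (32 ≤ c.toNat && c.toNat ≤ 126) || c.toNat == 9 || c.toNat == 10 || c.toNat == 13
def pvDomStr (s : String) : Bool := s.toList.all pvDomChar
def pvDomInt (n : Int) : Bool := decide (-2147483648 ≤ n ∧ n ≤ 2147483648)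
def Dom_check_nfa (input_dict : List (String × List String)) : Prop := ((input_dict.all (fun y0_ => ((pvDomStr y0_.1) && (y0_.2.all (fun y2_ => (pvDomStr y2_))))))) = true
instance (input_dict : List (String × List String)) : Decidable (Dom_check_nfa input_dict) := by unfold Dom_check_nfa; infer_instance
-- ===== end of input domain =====

-- B replaces A's per-state set-size duplicate test by sorting the first letters and
-- scanning adjacent pairs; same result, a different (order-based) duplicate detection.

-- ===== PORT A =====
-- [string[0] for string in strings if string] : for a non-empty string, string[0] is its first character
def firstLettersA (strings : List String) : List Char :=
  strings.filterMap (fun s => match s.toList with | [] => none | c :: _ => some c)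

def check_nfa : List (String × List String) → Bool
  | [] => true
  | (_, strings) :: rest =>
      let fl := firstLettersA strings
      if (PySem.Set.ofList fl).length < fl.length then false
      else check_nfa rest

-- ===== PORT B =====
-- sorted(s[0] for s in strings if s) : head? of the character list is s[0] when s is non-empty
def sortedFirstsB (strings : List String) : List Char :=
  PySem.List.sorted (strings.filterMap (fun s => s.toList.head?)) (fun c => c) false

def check_nfa_alt (input_dict : List (String × List String)) : Bool :=
  input_dict.all (fun p =>
    let firsts := sortedFirstsB p.2
    !((firsts.zip firsts.tail).any (fun q => q.1 == q.2)))

-- ===== PRECONDITION & SPEC =====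
def Spec_check_nfa (input_dict : List (String × List String)) (out : Bool) : Prop := out = check_nfa_alt input_dict
instance (input_dict : List (String × List String)) (out : Bool) : Decidable (Spec_check_nfa input_dict out) := by unfold Spec_check_nfa; infer_instance

-- ===== CLAIM (what is proved, stated in full; the proofs are below) =====
def Claim_equal_check_nfa : Prop := ∀ (input_dict : List (String × List String)), Dom_check_nfa input_dict → Spec_check_nfa input_dict (check_nfa input_dict)

-- ===== LEMMAS AND PROOFS =====

-- PySem.Set.ofList keeps the first occurrences in order, hence is a sublist
theorem ofList_sublist (xs : List Char) :
    (PySem.Set.ofList xs).Sublist xs := by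
  induction xs with
  | nil => simp [PySem.Set.ofList_nil]
  | cons x xs ih =>
      rw [PySem.Set.ofList_cons]
      refine List.Sublist.cons₂ x ?_
      exact List.Sublist.trans (by simp [PySem.Set.discard, List.filter_sublist]) ih

theorem setlen_lt_iff (xs : List Char) :
    ((PySem.Set.ofList xs).length < xs.length) ↔ ¬ xs.Nodup := by
  constructor
  · intro h hnd
    rw [PySem.Set.ofList_eq_self_of_nodup xs hnd] at h
    exact lt_irrefl _ h
  · intro hnd
    rcases Nat.lt_or_ge (PySem.Set.ofList xs).length xs.length with h | h
    · exact h
    · exfalso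
      have hsub := ofList_sublist xs
      have := hsub.eq_of_length (Nat.le_antisymm (hsub.length_le) h)
      exact hnd (this ▸ PySem.Set.nodup_ofList xs)

-- adjacent-equal scan on a ≤-sorted list detects exactly the duplicates
theorem adj_any_eq_not_nodup (l : List Char) (hp : l.Pairwise (· ≤ ·)) :
    ((l.zip l.tail).any (fun q => q.1 == q.2)) = !decide l.Nodup := by
  induction l with
  | nil => simp
  | cons a t ih =>
      cases t with
      | nil => simp
      | cons b t' =>
          have hp' : (b :: t').Pairwise (· ≤ ·) := hp.of_cons
          have hab : a ≤ b := (List.pairwise_cons.mp hp).1 b (by simp)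
          have hrest := ih hp'
          rw [show ((a :: b :: t').zip (a :: b :: t').tail) = (a, b) :: ((b :: t').zip (b :: t').tail) from rfl,
              List.any_cons, hrest]
          by_cases hab' : a = b
          · subst hab'
            simp [List.nodup_cons]
          · have hnotmem : a ∉ b :: t' := by
              intro hmem
              rcases List.mem_cons.mp hmem with h1 | h1
              · exact hab' h1
              · have hb : b ≤ a := (List.pairwise_cons.mp hp').1 a h1
                exact hab' (le_antisymm hab hb)
            simp [List.nodup_cons, hnotmem, hab']
-- per-state agreement of the two duplicate tests
theorem state_agree (strings : List String) :
    (decide ((PySem.Set.ofList (firstLettersA strings)).length < (firstLettersA strings).length))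
      = ((sortedFirstsB strings).zip (sortedFirstsB strings).tail).any (fun q => q.1 == q.2) := by
  have hfl : firstLettersA strings = strings.filterMap (fun s => s.toList.head?) := by
    unfold firstLettersA
    congr 1
    funext s
    cases s.toList <;> simp
  set fl := strings.filterMap (fun s => s.toList.head?) with hdef
  have hperm : (PySem.List.sorted fl (fun c => c) false).Perm fl :=
    PySem.List.sorted_perm fl (fun c => c) false
  have hpair : (PySem.List.sorted fl (fun c => c) false).Pairwise (· ≤ ·) := by
    have := PySem.List.sorted_pairwise fl (fun c => c)
    simpa using this
  have hadj := adj_any_eq_not_nodup _ hpair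
  unfold sortedFirstsB
  rw [hfl, ← hdef, hadj]
  have hnd : (PySem.List.sorted fl (fun c => c) false).Nodup ↔ fl.Nodup := hperm.nodup_iff
  by_cases h : fl.Nodup
  · have hlt : ¬ ((PySem.Set.ofList fl).length < fl.length) :=
      fun hlt => (setlen_lt_iff fl).mp hlt h
    simp [hlt, hnd.mpr h]
  · have h2 : ¬ (PySem.List.sorted fl (fun c => c) false).Nodup := fun hx => h (hnd.mp hx)
    simp [h2, (setlen_lt_iff fl).mpr h]

-- ===== VERDICT (by name: the statement is the Claim_ definition above) =====
theorem check_nfa_spec : Claim_equal_check_nfa := by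
  intro input_dict hdom
  unfold Spec_check_nfa
  clear hdom
  induction input_dict with
  | nil => rfl
  | cons p rest ih =>
      obtain ⟨k, strings⟩ := p
      simp only [check_nfa, check_nfa_alt, List.all_cons]
      have h := state_agree strings
      by_cases hdup : (PySem.Set.ofList (firstLettersA strings)).length < (firstLettersA strings).length
      · have hB : ((sortedFirstsB strings).zip (sortedFirstsB strings).tail).any (fun q => q.1 == q.2) = true := by
          rw [← h]; simp [hdup]
        simp [hdup, hB]
      · have hB : ((sortedFirstsB strings).zip (sortedFirstsB strings).tail).any (fun q => q.1 == q.2) = false := by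
          rw [← h]; simp [hdup]
        simpa [hdup, hB, check_nfa_alt] using ih
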